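-- pv_equiv track=rewrite | github.com/ivancitodosmil/Analizador_Lexico | analizador_lexico.py | obtener_estado
-- ===== SOURCE A (Python) =====
-- palabras_reservadas = {
--     "if", "else", "function", "return", "class",
--     "for", "while", "true", "false"
-- }
--
-- operadores = {
--     "==", "!=", "<=", ">=", "&&", "||", "+=", "-=", "=", "+", "-", "*", "/", "%", "^", "<", ">"
-- }
--
-- delimitadores = {"{", "}", "(", ")", ";", ","}
--
-- def es_letra(c):
--     return c.isalpha() or c == "_"
--
-- def es_decimal_valido(token):
--     if token.count('.') != 1:
--         return False
--     parte_entera, parte_decimal = token.split('.')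
--     return parte_entera.isdigit() and parte_decimal.isdigit() and parte_decimal != ""
--
-- def obtener_estado(token):
--     if token in palabras_reservadas:
--         return "q0"
--
--     if token in operadores:
--         if token == "&&":
--             return "q11"
--         elif token == "||":
--             return "q14"
--         elif token in {"<", ">", "="}:
--             return "q6"
--         elif token in {"==", "!=", "<=", ">="}:
--             return "q7"
--         elif token in {"+", "-", "*", "/", "^", "%"}:
--             return "q1"
--         elif token in {"+=", "-="}:
--             return "q10"
--         else:
--             return "q0"
--
--     if token in delimitadores:
--         if token in {"(", ")", "{", "}"}:
--             return "q13"
--         elif token == ",":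
--             return "q16"
--         elif token == ";":
--             return "q18"
--         else:
--             return "q0"
--
--     if es_decimal_valido(token):
--         return "q3"
--     elif token.isdigit():
--         return "q2"
--
--     if token.startswith('"') and token.endswith('"'):
--         return "q0"
--
--     if es_letra(token[0]):
--         if any(c.isdigit() for c in token):
--             return "q15"
--         else:
--             return "q9"
--
--     if token == "$":
--         return "q17"
--
--     return "ERROR"
-- ===== SOURCE B (Python) =====
-- RESERVADAS = ("if", "else", "function", "return", "class",
--               "for", "while", "true", "false")
--
-- def obtener_estado(token):
--     if token in RESERVADAS:
--         return "q0"
--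
--     # Single pass over the characters, collecting every statistic the
--     # classification needs; no count/split/isdigit/startswith re-scans.
--     n = 0
--     dots = 0
--     digits_before = 0   # digits seen before the first '.'
--     digits_after = 0    # digits seen after the first '.'
--     other = False       # some char that is neither a digit nor '.'
--     first = None
--     last = None
--     for c in token:
--         if n == 0:
--             first = c
--         last = c
--         n += 1
--         if c == '.':
--             dots += 1
--         elif c.isdigit():
--             if dots == 0:
--                 digits_before += 1
--             else:
--                 digits_after += 1
--         else:
--             other = True
--
--     # fixed two-character operators
--     if n == 2:
--         if token == "&&":
--             return "q11"
--         if token == "||":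
--             return "q14"
--         if token in ("==", "!=", "<=", ">="):
--             return "q7"
--         if token in ("+=", "-="):
--             return "q10"
--     # fixed single-character tokens, dispatched by the character class
--     if n == 1:
--         if first in "+-*/^%":
--             return "q1"
--         if first in "<>=":
--             return "q6"
--         if first in "(){}":
--             return "q13"
--         if first == ",":
--             return "q16"
--         if first == ";":
--             return "q18"
--         if first == "$":
--             return "q17"
--
--     if dots == 1 and not other and digits_before > 0 and digits_after > 0:
--         return "q3"
--     if n > 0 and dots == 0 and not other:
--         return "q2"
--     if first == '"' and last == '"':
--         return "q0"
--     if first.isalpha() or first == "_":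
--         return "q15" if digits_before + digits_after > 0 else "q9"
--     return "ERROR"
-- ===== Notes on version B (the rewrite author's own statement) =====
-- stated objective: alternative
-- what changed: B replaces A's staged predicates (set memberships plus count/split/isdigit/startswith/endswith/any, each re-scanning the token) by ONE left-to-right pass that accumulates length, dot count, digits before/after the first dot, a non-digit-non-dot flag and the first/last character, then classifies from those statistics; fixed one-character operators and delimiters are dispatched by character class instead of set membership.
import Mathlib
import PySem

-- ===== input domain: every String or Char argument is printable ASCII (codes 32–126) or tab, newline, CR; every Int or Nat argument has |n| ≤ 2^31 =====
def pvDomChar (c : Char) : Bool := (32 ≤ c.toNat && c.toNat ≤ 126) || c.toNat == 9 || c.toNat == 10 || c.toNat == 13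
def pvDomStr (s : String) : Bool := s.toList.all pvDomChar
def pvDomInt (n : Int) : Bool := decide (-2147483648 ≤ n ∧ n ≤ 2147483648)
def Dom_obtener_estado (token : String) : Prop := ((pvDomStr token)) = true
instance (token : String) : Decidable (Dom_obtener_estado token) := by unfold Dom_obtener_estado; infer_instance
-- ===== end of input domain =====

-- B replaces A's staged re-scanning predicates by ONE left-to-right pass collecting statistics, then a flat decision; objective: alternative (single-pass) algorithm.

-- ===== PORT A =====
def palabras_reservadas : PySem.Set String :=
  PySem.Set.ofList ["if", "else", "function", "return", "class", "for", "while", "true", "false"]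

def operadores : PySem.Set String :=
  PySem.Set.ofList ["==", "!=", "<=", ">=", "&&", "||", "+=", "-=", "=", "+", "-", "*", "/", "%", "^", "<", ">"]

def delimitadores : PySem.Set String := PySem.Set.ofList ["{", "}", "(", ")", ";", ","]

def es_letra (c : Char) : Bool := PySem.Chars.isalpha c || c == '_'

def es_decimal_valido (token : String) : Bool :=
  if PySem.Str.count token "." ≠ 1 then false
  else
    -- count('.') == 1 guarantees split('.') yields exactly two parts; other shapes are unreachable
    match PySem.Str.split? token "." with
    | some [parte_entera, parte_decimal] =>
        PySem.Str.strIsdigit parte_entera && PySem.Str.strIsdigit parte_decimal && parte_decimal ≠ ""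
    | _ => false

def obtener_estado (token : String) : String :=
  if token ∈ palabras_reservadas then "q0"
  else if token ∈ operadores then
    (if token = "&&" then "q11"
     else if token = "||" then "q14"
     else if token ∈ PySem.Set.ofList ["<", ">", "="] then "q6"
     else if token ∈ PySem.Set.ofList ["==", "!=", "<=", ">="] then "q7"
     else if token ∈ PySem.Set.ofList ["+", "-", "*", "/", "^", "%"] then "q1"
     else if token ∈ PySem.Set.ofList ["+=", "-="] then "q10"
     else "q0")
  else if token ∈ delimitadores then
    (if token ∈ PySem.Set.ofList ["(", ")", "{", "}"] then "q13"
     else if token = "," then "q16"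
     else if token = ";" then "q18"
     else "q0")
  else if es_decimal_valido token then "q3"
  else if PySem.Str.strIsdigit token then "q2"
  else if PySem.Str.startswith token "\"" && PySem.Str.endswith token "\"" then "q0"
  else
    match PySem.Str.pyGet? token 0 with  -- token[0]; none = IndexError, excluded by Pre_
    | none => "ERROR"
    | some c =>
      if es_letra c then
        (if token.toList.any PySem.Chars.isdigit then "q15" else "q9")
      else if token = "$" then "q17"
      else "ERROR"

-- ===== PORT B =====
def reservadas_b : List String :=
  ["if", "else", "function", "return", "class", "for", "while", "true", "false"]

-- the statistics B's single pass accumulates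
structure ScanB where
  n : Int
  dots : Int
  db : Int      -- digits seen before the first '.'
  da : Int      -- digits seen after the first '.'
  other : Bool  -- some char that is neither a digit nor '.'
  first : Option Char
  last : Option Char
deriving Repr, DecidableEq

-- one iteration of B's `for c in token` loop body
def scanStep (s : ScanB) (c : Char) : ScanB :=
  let first := if s.n = 0 then some c else s.first
  let last := some c
  let n := s.n + 1
  if c = '.' then ⟨n, s.dots + 1, s.db, s.da, s.other, first, last⟩
  else if PySem.Chars.isdigit c then
    (if s.dots = 0 then ⟨n, s.dots, s.db + 1, s.da, s.other, first, last⟩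
     else ⟨n, s.dots, s.db, s.da + 1, s.other, first, last⟩)
  else ⟨n, s.dots, s.db, s.da, true, first, last⟩

def scanInit : ScanB := ⟨0, 0, 0, 0, false, none, none⟩

-- Python's `first in "<chars>"` where first is a one-char string (or None, which compares unequal)
def charIn (o : Option Char) (cs : String) : Bool :=
  match o with
  | some c => cs.toList.contains c
  | none => false

def obtener_estado_alt (token : String) : String :=
  if reservadas_b.contains token then "q0"
  else
    let s := token.toList.foldl scanStep scanInit
    if s.n = 2 ∧ token = "&&" then "q11"
    else if s.n = 2 ∧ token = "||" then "q14"
    else if s.n = 2 ∧ (token = "==" ∨ token = "!=" ∨ token = "<=" ∨ token = ">=") then "q7"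
    else if s.n = 2 ∧ (token = "+=" ∨ token = "-=") then "q10"
    else if s.n = 1 ∧ charIn s.first "+-*/^%" then "q1"
    else if s.n = 1 ∧ charIn s.first "<>=" then "q6"
    else if s.n = 1 ∧ charIn s.first "(){}" then "q13"
    else if s.n = 1 ∧ s.first = some ',' then "q16"
    else if s.n = 1 ∧ s.first = some ';' then "q18"
    else if s.n = 1 ∧ s.first = some '$' then "q17"
    else if s.dots = 1 ∧ s.other = false ∧ 0 < s.db ∧ 0 < s.da then "q3"
    else if 0 < s.n ∧ s.dots = 0 ∧ s.other = false then "q2"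
    else if s.first = some '"' ∧ s.last = some '"' then "q0"
    else
      match s.first with
      | none => "ERROR"  -- Python raises AttributeError here (empty token); excluded by Pre_
      | some c => if PySem.Chars.isalpha c || c == '_' then (if 0 < s.db + s.da then "q15" else "q9") else "ERROR"

-- ===== PRECONDITION & SPEC =====
-- Pre_ excludes only the empty token, on which both Pythons raise (A: IndexError at token[0]).
def Pre_obtener_estado (token : String) : Prop := token ≠ ""
instance (token : String) : Decidable (Pre_obtener_estado token) := by unfold Pre_obtener_estado; infer_instance
def pvWitness_obtener_estado : String := "x"

def Spec_obtener_estado (token : String) (out : String) : Prop := out = obtener_estado_alt token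
instance (token : String) (out : String) : Decidable (Spec_obtener_estado token out) := by unfold Spec_obtener_estado; infer_instance

-- ===== CLAIM (what is proved, stated in full; the proofs are below) =====
def Claim_equal_obtener_estado : Prop := ∀ (token : String), Dom_obtener_estado token → Pre_obtener_estado token → Spec_obtener_estado token (obtener_estado token)

-- ===== LEMMAS AND PROOFS =====
def pvFix : List String := ["if", "else", "function", "return", "class", "for", "while", "true", "false", "==", "!=", "<=", ">=", "&&", "||", "+=", "-=", "=", "+", "-", "*", "/", "%", "^", "<", ">", "{", "}", "(", ")", ";", ",", "$"]

-- the char B's scan flags as 'other'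
def pvOtherC (c : Char) : Bool := !(c == '.') && !PySem.Chars.isdigit c

theorem scan_n (l : List Char) (s : ScanB) : (l.foldl scanStep s).n = s.n + l.length := by
  induction l generalizing s with
  | nil => simp
  | cons c t ih =>
    simp only [List.foldl_cons, ih]
    simp [scanStep]; split_ifs <;> push_cast <;> ring

theorem scan_dots (l : List Char) (s : ScanB) : (l.foldl scanStep s).dots = s.dots + (l.count '.' : Int) := by
  induction l generalizing s with
  | nil => simp
  | cons c t ih =>
    simp only [List.foldl_cons, ih]
    by_cases hc : c = '.'
    · subst hc; simp [scanStep]; ring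
    · simp [scanStep, hc]
      split_ifs <;> simp

theorem scan_other (l : List Char) (s : ScanB) : (l.foldl scanStep s).other = (s.other || l.any pvOtherC) := by
  induction l generalizing s with
  | nil => simp
  | cons c t ih =>
    rw [List.foldl_cons, ih, List.any_cons]
    by_cases hc : c = '.'
    · subst hc; simp [scanStep, pvOtherC]
    · by_cases hd : PySem.Chars.isdigit c
      · simp [scanStep, hc, hd, pvOtherC]; split_ifs <;> simp
      · simp [scanStep, hc, hd, pvOtherC]

theorem scan_last (l : List Char) (s : ScanB) (h : l ≠ []) : (l.foldl scanStep s).last = l.getLast? := by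
  induction l generalizing s with
  | nil => simp at h
  | cons c t ih =>
    rcases t with _ | ⟨d, u⟩
    · simp [scanStep]; split_ifs <;> rfl
    · rw [List.foldl_cons, ih _ (by simp), List.getLast?_cons_cons]

theorem scan_first_pos (l : List Char) (s : ScanB) (h : 0 < s.n) : (l.foldl scanStep s).first = s.first := by
  induction l generalizing s with
  | nil => rfl
  | cons c t ih =>
    rw [List.foldl_cons, ih]
    · simp [scanStep]; split_ifs <;> simp <;> omega
    · simp [scanStep]; split_ifs <;> simp <;> omega

theorem scan_first (c : Char) (t : List Char) (s : ScanB) (h : s.n = 0) :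
    ((c :: t).foldl scanStep s).first = some c := by
  rw [List.foldl_cons, scan_first_pos]
  · simp [scanStep, h]; split_ifs <;> rfl
  · simp [scanStep]; split_ifs <;> simp <;> omega

theorem scan_da_pos (l : List Char) (s : ScanB) (h : 0 < s.dots) :
    (l.foldl scanStep s).db = s.db ∧ (l.foldl scanStep s).da = s.da + (l.countP PySem.Chars.isdigit : Int) := by
  induction l generalizing s with
  | nil => simp
  | cons c t ih =>
    rw [List.foldl_cons]
    by_cases hc : c = '.'
    · subst hc
      obtain ⟨h1, h2⟩ := ih (scanStep s '.') (by simp [scanStep]; omega)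
      refine ⟨by simpa [scanStep] using h1, ?_⟩
      rw [h2]; simp [scanStep, PySem.Chars.isdigit]
    · by_cases hd : PySem.Chars.isdigit c
      · have hz : ¬ s.dots = 0 := by omega
        obtain ⟨h1, h2⟩ := ih (scanStep s c) (by simp [scanStep, hc, hd, hz]; omega)
        refine ⟨?_, ?_⟩
        · rw [h1]; simp [scanStep, hc, hd, hz]
        · rw [h2]; simp [scanStep, hc, hd, hz]; ring
      · obtain ⟨h1, h2⟩ := ih (scanStep s c) (by simp [scanStep, hc, hd]; omega)
        refine ⟨by simpa [scanStep, hc, hd] using h1, ?_⟩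
        rw [h2]; simp [scanStep, hc, hd]

theorem scan_db_zero (l : List Char) (s : ScanB) (h : s.dots = 0) :
    (l.foldl scanStep s).db = s.db + ((l.takeWhile (· ≠ '.')).countP PySem.Chars.isdigit : Int) ∧
    (l.foldl scanStep s).da = s.da + (((l.dropWhile (· ≠ '.')).drop 1).countP PySem.Chars.isdigit : Int) := by
  induction l generalizing s with
  | nil => simp
  | cons c t ih =>
    rw [List.foldl_cons]
    by_cases hc : c = '.'
    · subst hc
      obtain ⟨h1, h2⟩ := scan_da_pos t (scanStep s '.') (by simp [scanStep]; omega)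
      refine ⟨?_, ?_⟩
      · rw [h1]; simp [scanStep]
      · rw [h2]; simp [scanStep]
    · by_cases hd : PySem.Chars.isdigit c
      · obtain ⟨h1, h2⟩ := ih (scanStep s c) (by simp [scanStep, hc, hd, h])
        refine ⟨?_, ?_⟩
        · rw [h1]; simp [scanStep, hc, hd, h]
          ring
        · rw [h2]; simp [scanStep, hc, hd, h]
      · obtain ⟨h1, h2⟩ := ih (scanStep s c) (by simp [scanStep, hc, hd, h])
        refine ⟨?_, ?_⟩
        · rw [h1]; simp [scanStep, hc, h, hd]
        · rw [h2]; simp [scanStep, hc, hd, h]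

theorem countgo_single (d : Char) : ∀ (fuel : Nat) (l : List Char) (acc : Nat), l.length ≤ fuel →
    PySem.Chars.count.go [d] fuel l acc = acc + l.count d := by
  intro fuel
  induction fuel with
  | zero =>
    intro l acc h
    have hl : l = [] := by simpa using h
    subst hl; rw [PySem.Chars.count.go]; simp
  | succ f ih =>
    intro l acc h
    rcases l with _ | ⟨c, t⟩
    · rw [PySem.Chars.count.go]; simp; omega
    · rw [PySem.Chars.count.go]
      by_cases hc : d = c
      · subst hc
        rw [if_pos (by simp [List.isPrefixOf])]
        have hdrop : List.drop ([d].length) (d :: t) = t := by simp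
        rw [hdrop, ih t (acc + 1) (by simpa using h)]
        simp; omega
      · rw [if_neg (by simp [List.isPrefixOf]; exact hc)]
        rw [ih t acc (by simpa using h)]
        have hbe : (c == d) = false := by simp; exact fun hh => hc hh.symm
        simp [List.count_cons, hbe]

theorem count_single (l : List Char) (d : Char) : PySem.Chars.count l [d] = l.count d := by
  rw [PySem.Chars.count]
  simp [countgo_single d l.length l 0 le_rfl]

theorem splitgo_zero (d : Char) : ∀ (fuel : Nat) (l cur : List Char) (acc : List (List Char)),
    l.count d = 0 → l.length < fuel →
    PySem.Chars.splitOn.go [d] fuel l cur acc = acc.reverse ++ [cur.reverse ++ l] := by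
  intro fuel
  induction fuel with
  | zero => intro l cur acc _ h; omega
  | succ f ih =>
    intro l cur acc h0 h
    rcases l with _ | ⟨c, t⟩
    · rw [PySem.Chars.splitOn.go]; simp; omega
    · have hc : ¬ d = c := by
        intro hh; subst hh; simp at h0
      rw [PySem.Chars.splitOn.go]
      have hbe : (c == d) = false := by simp; exact fun hh => hc hh.symm
      rw [if_neg (by simp [List.isPrefixOf]; exact hc)]
      rw [ih t (c :: cur) acc (by simpa [List.count_cons, hbe] using h0) (by simpa using h)]
      simp

theorem splitgo_one (d : Char) : ∀ (fuel : Nat) (l cur : List Char) (acc : List (List Char)),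
    l.count d = 1 → l.length < fuel →
    PySem.Chars.splitOn.go [d] fuel l cur acc =
      acc.reverse ++ [cur.reverse ++ l.takeWhile (· ≠ d), (l.dropWhile (· ≠ d)).drop 1] := by
  intro fuel
  induction fuel with
  | zero => intro l cur acc _ h; omega
  | succ f ih =>
    intro l cur acc h1 h
    rcases l with _ | ⟨c, t⟩
    · simp at h1
    · by_cases hc : d = c
      · subst hc
        have ht : t.count d = 0 := by simpa [List.count_cons] using h1
        rw [PySem.Chars.splitOn.go]
        rw [if_pos (by simp [List.isPrefixOf])]
        have hdrop : List.drop ([d].length) (d :: t) = t := by simp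
        rw [hdrop, splitgo_zero d f t [] (cur.reverse :: acc) ht (by simpa using h)]
        simp
      · have hbe : (c == d) = false := by simp; exact fun hh => hc hh.symm
        rw [PySem.Chars.splitOn.go]
        rw [if_neg (by simp [List.isPrefixOf]; exact hc)]
        have hcd : ¬ c = d := fun hh => hc hh.symm
        rw [ih t (c :: cur) acc (by simpa [List.count_cons, hbe] using h1) (by simpa using h)]
        simp [hcd]

theorem splitOn_single_one (l : List Char) (d : Char) (h : l.count d = 1) :
    PySem.Chars.splitOn l [d] = [l.takeWhile (· ≠ d), (l.dropWhile (· ≠ d)).drop 1] := by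
  rw [PySem.Chars.splitOn, splitgo_one d (l.length + 1) l [] [] h (by omega)]
  simp only [List.reverse_nil, List.nil_append]

theorem startswith_single (l : List Char) (c : Char) :
    PySem.Chars.startswith l [c] = true ↔ l.head? = some c := by
  rcases l with _ | ⟨a, t⟩
  · simp [PySem.Chars.startswith, List.isPrefixOf]
  · have hrfl : PySem.Chars.startswith (a :: t) [c] = ((c == a) && List.isPrefixOf [] t) := rfl
    have h2 : List.isPrefixOf ([] : List Char) t = true := rfl
    rw [hrfl, h2, Bool.and_true, beq_iff_eq, List.head?_cons, Option.some.injEq]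
    exact eq_comm

theorem endswith_single (l : List Char) (c : Char) :
    PySem.Chars.endswith l [c] = true ↔ l.getLast? = some c := by
  rw [PySem.Chars.endswith_iff, List.getLast?_eq_some_iff]
  constructor
  · rintro ⟨t, ht⟩; exact ⟨t, ht.symm⟩
  · rintro ⟨t, ht⟩; exact ⟨t, ht.symm⟩

theorem dot_decomp (l : List Char) (h : ('.' : Char) ∈ l) :
    l = l.takeWhile (· ≠ '.') ++ '.' :: (l.dropWhile (· ≠ '.')).drop 1 := by
  induction l with
  | nil => simp at h
  | cons c t ih =>
    by_cases hc : c = '.'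
    · subst hc; simp
    · have ht : ('.' : Char) ∈ t := by
        rcases List.mem_cons.mp h with h' | h'
        · exact absurd h'.symm hc
        · exact h'
      rw [List.takeWhile_cons_of_pos (by simp [hc]), List.dropWhile_cons_of_pos (by simp [hc])]
      conv_lhs => rw [ih ht]
      rfl


theorem token_single (token : String) (c : Char) (h : token.toList = [c]) : token = String.ofList [c] := by
  rw [← @String.ofList_toList token, h]

set_option maxRecDepth 100000 in
theorem pv_equal (token : String) : obtener_estado token = obtener_estado_alt token := by
  by_cases hf : token ∈ pvFix
  · simp only [pvFix, List.mem_cons] at hf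
    rcases hf with rfl|rfl|rfl|rfl|rfl|rfl|rfl|rfl|rfl|rfl|rfl|rfl|rfl|rfl|rfl|rfl|rfl|rfl|rfl|rfl|rfl|rfl|rfl|rfl|rfl|rfl|rfl|rfl|rfl|rfl|rfl|rfl|rfl|hf
    all_goals try rfl
    simp at hf
  · simp only [pvFix, List.mem_cons, not_or] at hf
    obtain ⟨h1, h2, h3, h4, h5, h6, h7, h8, h9, h10, h11, h12, h13, h14, h15, h16, h17, h18, h19, h20, h21, h22, h23, h24, h25, h26, h27, h28, h29, h30, h31, h32, h33, -⟩ := hf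
    by_cases he : token = ""
    · subst he; rfl
    have hl : token.toList ≠ [] := fun hnil => he (by rw [← @String.ofList_toList token, hnil])
    obtain ⟨c0, t0, hct⟩ : ∃ c t, token.toList = c :: t := by
      rcases hx : token.toList with _ | ⟨c, t⟩
      · exact absurd hx hl
      · exact ⟨_, _, rfl⟩
    -- A-side membership rejections
    have hp : token ∉ palabras_reservadas := by
      simp [palabras_reservadas, PySem.Set.mem_ofList, h1, h2, h3, h4, h5, h6, h7, h8, h9]
    have hop : token ∉ operadores := by
      simp [operadores, PySem.Set.mem_ofList, h10, h11, h12, h13, h14, h15, h16, h17, h18, h19, h20, h21, h22, h23, h24, h25, h26]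
    have hd : token ∉ delimitadores := by
      simp [delimitadores, PySem.Set.mem_ofList, h27, h28, h29, h30, h31, h32]
    have hres : ¬ reservadas_b.contains token = true := by
      simp [reservadas_b, h1, h2, h3, h4, h5, h6, h7, h8, h9]
    -- B-side statistics of the single scan
    set l := token.toList with hld
    set s := l.foldl scanStep scanInit with hsd
    have hn : s.n = (l.length : Int) := by rw [hsd, scan_n]; simp [scanInit]
    have hdots : s.dots = (l.count '.' : Int) := by rw [hsd, scan_dots]; simp [scanInit]
    have hoth : s.other = l.any pvOtherC := by rw [hsd, scan_other]; simp [scanInit]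
    have hlast : s.last = l.getLast? := scan_last l scanInit hl
    have hfirst : s.first = some c0 := by rw [hsd, hct]; exact scan_first c0 t0 scanInit rfl
    have hdb : s.db = ((l.takeWhile (· ≠ '.')).countP PySem.Chars.isdigit : Int) := by
      have h' := (scan_db_zero l scanInit rfl).1; rw [hsd]; simpa [scanInit] using h'
    have hda : s.da = (((l.dropWhile (· ≠ '.')).drop 1).countP PySem.Chars.isdigit : Int) := by
      have h' := (scan_db_zero l scanInit rfl).2; rw [hsd]; simpa [scanInit] using h'
    have hcount : PySem.Str.count token "." = l.count '.' := by
      rw [PySem.Str.count_eq]; exact count_single l '.'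
    -- the fixed-token branches of B are unreachable
    have hone : s.n = 1 → l = [c0] := by
      intro h1n
      have hlen : l.length = 1 := by omega
      rw [hct] at hlen ⊢
      have ht0 : t0 = [] := by
        simp only [List.length_cons] at hlen
        exact List.length_eq_zero_iff.mp (by omega)
      rw [ht0]
    have f1 : ¬ (s.n = 2 ∧ token = "&&") := fun h => h14 h.2
    have f2 : ¬ (s.n = 2 ∧ token = "||") := fun h => h15 h.2
    have f3 : ¬ (s.n = 2 ∧ (token = "==" ∨ token = "!=" ∨ token = "<=" ∨ token = ">=")) := by
      rintro ⟨-, h | h | h | h⟩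
      exacts [h10 h, h11 h, h12 h, h13 h]
    have f4 : ¬ (s.n = 2 ∧ (token = "+=" ∨ token = "-=")) := by
      rintro ⟨-, h | h⟩
      exacts [h16 h, h17 h]
    have f5 : ¬ (s.n = 1 ∧ charIn s.first "+-*/^%") := by
      rintro ⟨h1n, hin⟩
      have hl1 := hone h1n
      rw [hfirst] at hin
      have hin' : c0 ∈ ['+', '-', '*', '/', '^', '%'] := by
        simpa [charIn] using hin
      simp only [List.mem_cons, List.not_mem_nil, or_false] at hin'
      rcases hin' with rfl | rfl | rfl | rfl | rfl | rfl
      exacts [h19 ((token_single token _ hl1).trans rfl), h20 ((token_single token _ hl1).trans rfl),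
              h21 ((token_single token _ hl1).trans rfl), h22 ((token_single token _ hl1).trans rfl),
              h24 ((token_single token _ hl1).trans rfl), h23 ((token_single token _ hl1).trans rfl)]
    have f6 : ¬ (s.n = 1 ∧ charIn s.first "<>=") := by
      rintro ⟨h1n, hin⟩
      have hl1 := hone h1n
      rw [hfirst] at hin
      have hin' : c0 ∈ ['<', '>', '='] := by simpa [charIn] using hin
      simp only [List.mem_cons, List.not_mem_nil, or_false] at hin'
      rcases hin' with rfl | rfl | rfl
      exacts [h25 ((token_single token _ hl1).trans rfl), h26 ((token_single token _ hl1).trans rfl),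
              h18 ((token_single token _ hl1).trans rfl)]
    have f7 : ¬ (s.n = 1 ∧ charIn s.first "(){}") := by
      rintro ⟨h1n, hin⟩
      have hl1 := hone h1n
      rw [hfirst] at hin
      have hin' : c0 ∈ ['(', ')', '{', '}'] := by simpa [charIn] using hin
      simp only [List.mem_cons, List.not_mem_nil, or_false] at hin'
      rcases hin' with rfl | rfl | rfl | rfl
      exacts [h29 ((token_single token _ hl1).trans rfl), h30 ((token_single token _ hl1).trans rfl),
              h27 ((token_single token _ hl1).trans rfl), h28 ((token_single token _ hl1).trans rfl)]
    have f8 : ¬ (s.n = 1 ∧ s.first = some ',') := by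
      rintro ⟨h1n, hin⟩
      rw [hfirst, Option.some.injEq] at hin
      subst hin
      exact h32 ((token_single token _ (hone h1n)).trans rfl)
    have f9 : ¬ (s.n = 1 ∧ s.first = some ';') := by
      rintro ⟨h1n, hin⟩
      rw [hfirst, Option.some.injEq] at hin
      subst hin
      exact h31 ((token_single token _ (hone h1n)).trans rfl)
    have f10 : ¬ (s.n = 1 ∧ s.first = some '$') := by
      rintro ⟨h1n, hin⟩
      rw [hfirst, Option.some.injEq] at hin
      subst hin
      exact h33 ((token_single token _ (hone h1n)).trans rfl)
    -- notation for the two pieces around the first dot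
    -- the dynamic predicates, related to the scan statistics
    have hsum : s.db + s.da = (l.countP PySem.Chars.isdigit : Int) := by
      rw [hdb, hda]
      by_cases hmem : ('.' : Char) ∈ l
      · conv_rhs => rw [dot_decomp l hmem]
        rw [List.countP_append, List.countP_cons]
        norm_num [show PySem.Chars.isdigit '.' = false from rfl]
      · have hdw : l.dropWhile (· ≠ '.') = [] := by
          rw [List.dropWhile_eq_nil_iff]
          intro x hx
          simp only [ne_eq, decide_not, Bool.not_eq_eq_eq_not, Bool.not_true, decide_eq_false_iff_not]
          exact fun hxx => hmem (hxx ▸ hx)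
        have htw : l.takeWhile (· ≠ '.') = l := by
          conv_rhs => rw [← List.takeWhile_append_dropWhile (p := fun x => decide (x ≠ '.')) (l := l)]
          rw [hdw, List.append_nil]
        rw [htw, hdw]
        simp
    have hnoth : s.other = false ↔ ∀ x ∈ l, x = '.' ∨ PySem.Chars.isdigit x = true := by
      rw [hoth]
      simp only [List.any_eq_false, pvOtherC]
      constructor
      · intro h x hx
        have := h x hx
        by_cases hxx : x = '.'
        · exact Or.inl hxx
        · right
          simpa [hxx] using this
      · intro h x hx
        rcases h x hx with rfl | hdig
        · simp
        · simp [hdig]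
    have E2 : PySem.Str.strIsdigit token = true ↔ (0 < s.n ∧ s.dots = 0 ∧ s.other = false) := by
      rw [PySem.Str.strIsdigit_eq]
      unfold PySem.Chars.strIsdigit
      rw [← hld]
      constructor
      · intro h
        simp only [Bool.and_eq_true, Bool.not_eq_eq_eq_not, Bool.not_true, List.isEmpty_eq_false_iff,
          List.all_eq_true] at h
        obtain ⟨hne, hall⟩ := h
        have hnodot : ('.' : Char) ∉ l := fun hmem => by
          have := hall '.' hmem; simp [show PySem.Chars.isdigit '.' = false from rfl] at this
        refine ⟨by rw [hn]; rw [hct]; simp, by rw [hdots]; simp [List.count_eq_zero_of_not_mem hnodot], ?_⟩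
        rw [hnoth]
        exact fun x hx => Or.inr (hall x hx)
      · rintro ⟨-, hd0, hother⟩
        have hnodot : ('.' : Char) ∉ l := by
          rw [hdots] at hd0
          have : l.count '.' = 0 := by exact_mod_cast hd0
          exact List.count_eq_zero.mp this
        rw [hnoth] at hother
        simp only [Bool.and_eq_true, Bool.not_eq_eq_eq_not, Bool.not_true, List.isEmpty_eq_false_iff,
          List.all_eq_true]
        refine ⟨hl, fun x hx => ?_⟩
        rcases hother x hx with rfl | hdig
        · exact absurd hx hnodot
        · exact hdig
    have E1 : es_decimal_valido token = true ↔ (s.dots = 1 ∧ s.other = false ∧ 0 < s.db ∧ 0 < s.da) := by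
      by_cases hc1 : l.count '.' = 1
      · have hmem : ('.' : Char) ∈ l := List.count_pos_iff.mp (by omega)
        have hsp : PySem.Str.split? token "." =
            some [String.ofList (l.takeWhile (· ≠ '.')), String.ofList ((l.dropWhile (· ≠ '.')).drop 1)] := by
          have hsp0 : PySem.Str.split? token "." = some ((PySem.Chars.splitOn l ['.']).map String.ofList) := rfl
          rw [hsp0, splitOn_single_one l '.' hc1]
          rfl
        have hA : es_decimal_valido token =
            (PySem.Chars.strIsdigit (l.takeWhile (· ≠ '.')) &&
             PySem.Chars.strIsdigit ((l.dropWhile (· ≠ '.')).drop 1) &&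
             decide (String.ofList ((l.dropWhile (· ≠ '.')).drop 1) ≠ "")) := by
          unfold es_decimal_valido
          rw [if_neg (by rw [hcount]; exact not_not_intro hc1), hsp]
          simp only [PySem.Str.strIsdigit_eq, String.toList_ofList]
        have hemp : String.ofList ((l.dropWhile (· ≠ '.')).drop 1) = "" ↔ (l.dropWhile (· ≠ '.')).drop 1 = [] := by
          constructor
          · intro h
            have := congrArg String.toList h
            simpa using this
          · intro h
            rw [h]
        have hBnodot : ∀ x ∈ l.takeWhile (· ≠ '.'), ¬ x = '.' := fun x hx => by
          have := List.mem_takeWhile_imp hx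
          simpa using this
        have hA2nodot : ('.' : Char) ∉ (l.dropWhile (· ≠ '.')).drop 1 := by
          intro hmem2
          have hdecomp := dot_decomp l hmem
          have hcc : l.count '.' = (l.takeWhile (· ≠ '.')).count '.' +
              (((l.dropWhile (· ≠ '.')).drop 1).count '.' + 1) := by
            conv_lhs => rw [hdecomp]
            rw [List.count_append, List.count_cons]
            simp
          have h2 : 1 ≤ ((l.dropWhile (· ≠ '.')).drop 1).count '.' := List.one_le_count_iff.mpr hmem2
          omega
        rw [hA]
        simp only [Bool.and_eq_true, decide_eq_true_eq, PySem.Chars.strIsdigit,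
          Bool.not_eq_eq_eq_not, Bool.not_true, List.isEmpty_eq_false_iff, List.all_eq_true]
        constructor
        · rintro ⟨⟨⟨hBne, hBall⟩, hAne, hAall⟩, -⟩
          refine ⟨by rw [hdots, hc1]; rfl, ?_, ?_, ?_⟩
          · rw [hnoth]
            intro x hx
            conv at hx => rw [dot_decomp l hmem]
            rcases List.mem_append.mp hx with hx' | hx'
            · exact Or.inr (hBall x hx')
            · rcases List.mem_cons.mp hx' with rfl | hx''
              · exact Or.inl rfl
              · exact Or.inr (hAall x hx'')
          · rw [hdb]
            have : 0 < (l.takeWhile (· ≠ '.')).countP PySem.Chars.isdigit := by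
              rw [List.countP_pos_iff]
              obtain ⟨x, hx⟩ := List.exists_mem_of_ne_nil _ hBne
              exact ⟨x, hx, hBall x hx⟩
            omega
          · rw [hda]
            have : 0 < ((l.dropWhile (· ≠ '.')).drop 1).countP PySem.Chars.isdigit := by
              rw [List.countP_pos_iff]
              obtain ⟨x, hx⟩ := List.exists_mem_of_ne_nil _ hAne
              exact ⟨x, hx, hAall x hx⟩
            omega
        · rintro ⟨-, hother, hdbpos, hdapos⟩
          rw [hnoth] at hother
          rw [hdb] at hdbpos
          rw [hda] at hdapos
          have hBpos : 0 < (l.takeWhile (· ≠ '.')).countP PySem.Chars.isdigit := by omega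
          have hApos : 0 < ((l.dropWhile (· ≠ '.')).drop 1).countP PySem.Chars.isdigit := by omega
          have hsub : ∀ x ∈ l.takeWhile (· ≠ '.'), x ∈ l := fun x hx => by
            rw [dot_decomp l hmem]
            exact List.mem_append.mpr (Or.inl hx)
          have hsub2 : ∀ x ∈ (l.dropWhile (· ≠ '.')).drop 1, x ∈ l := fun x hx => by
            rw [dot_decomp l hmem]
            exact List.mem_append.mpr (Or.inr (List.mem_cons.mpr (Or.inr hx)))
          refine ⟨⟨⟨?_, ?_⟩, ?_, ?_⟩, ?_⟩
          · obtain ⟨x, hx, -⟩ := List.countP_pos_iff.mp hBpos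
            exact List.ne_nil_of_mem hx
          · intro x hx
            rcases hother x (hsub x hx) with rfl | hdig
            · exact absurd rfl (hBnodot _ hx)
            · exact hdig
          · obtain ⟨x, hx, -⟩ := List.countP_pos_iff.mp hApos
            exact List.ne_nil_of_mem hx
          · intro x hx
            rcases hother x (hsub2 x hx) with rfl | hdig
            · exact absurd hx hA2nodot
            · exact hdig
          · obtain ⟨x, hx, -⟩ := List.countP_pos_iff.mp hApos
            exact fun hq => List.ne_nil_of_mem hx (hemp.mp hq)
      · constructor
        · intro h
          exfalso
          unfold es_decimal_valido at h
          rw [if_pos (by rw [hcount]; exact hc1)] at h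
          exact Bool.false_ne_true h
        · rintro ⟨hdot1, -⟩
          exfalso
          rw [hdots] at hdot1
          exact hc1 (by exact_mod_cast hdot1)
    have E3 : (PySem.Str.startswith token "\"" && PySem.Str.endswith token "\"") = true ↔
        (s.first = some '"' ∧ s.last = some '"') := by
      rw [Bool.and_eq_true, PySem.Str.startswith_eq, PySem.Str.endswith_eq]
      have hsw : PySem.Chars.startswith token.toList "\"".toList = PySem.Chars.startswith l ['"'] := rfl
      have hew : PySem.Chars.endswith token.toList "\"".toList = PySem.Chars.endswith l ['"'] := rfl
      rw [hsw, hew, startswith_single, endswith_single, hlast]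
      have hh : l.head? = some c0 := by rw [hct]; rfl
      rw [hfirst, hh]
    have E4 : PySem.Str.pyGet? token 0 = some c0 := by
      rw [PySem.Str.pyGet?_eq]
      have : PySem.Chars.pyGet? token.toList 0 = PySem.List.pyGet? l 0 := by
        rw [← hld]; simp [pysem]
      rw [this, hct]
      exact PySem.List.pyGet?_zero_cons c0 t0
    have E5 : l.any PySem.Chars.isdigit = true ↔ 0 < s.db + s.da := by
      rw [hsum, List.any_eq_true]
      constructor
      · rintro ⟨x, hx, hdig⟩
        have : 0 < l.countP PySem.Chars.isdigit := List.countP_pos_iff.mpr ⟨x, hx, hdig⟩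
        omega
      · intro h
        have : 0 < l.countP PySem.Chars.isdigit := by omega
        obtain ⟨x, hx, hdig⟩ := List.countP_pos_iff.mp this
        exact ⟨x, hx, hdig⟩
    -- assemble the two decision chains
    unfold obtener_estado obtener_estado_alt
    rw [if_neg hp, if_neg hop, if_neg hd, if_neg hres]
    simp only [← hld, ← hsd]
    rw [if_neg f1, if_neg f2, if_neg f3, if_neg f4, if_neg f5, if_neg f6, if_neg f7, if_neg f8,
      if_neg f9, if_neg f10]
    by_cases c1 : s.dots = 1 ∧ s.other = false ∧ 0 < s.db ∧ 0 < s.da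
    · rw [if_pos (E1.mpr c1), if_pos c1]
    rw [if_neg (fun h => c1 (E1.mp h)), if_neg c1]
    by_cases c2 : 0 < s.n ∧ s.dots = 0 ∧ s.other = false
    · rw [if_pos (E2.mpr c2), if_pos c2]
    rw [if_neg (fun h => c2 (E2.mp h)), if_neg c2]
    by_cases c3 : s.first = some '"' ∧ s.last = some '"'
    · rw [if_pos (E3.mpr c3), if_pos c3]
    rw [if_neg (fun h => c3 (E3.mp h)), if_neg c3]
    rw [E4, hfirst]
    simp only []
    unfold es_letra
    by_cases c4 : (PySem.Chars.isalpha c0 || c0 == '_') = true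
    · rw [if_pos c4, if_pos c4]
      by_cases c5 : l.any PySem.Chars.isdigit = true
      · rw [if_pos c5, if_pos (E5.mp c5)]
      · rw [if_neg c5, if_neg (fun h => c5 (E5.mpr h))]
    · rw [if_neg c4, if_neg c4, if_neg h33]

-- ===== VERDICT (by name: the statement is the Claim_ definition above) =====
theorem obtener_estado_spec : Claim_equal_obtener_estado := by
  intro token _ _
  unfold Spec_obtener_estado
  exact pv_equal token
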